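-- pv_equiv track=rewrite | github.com/raymondchiang/calc-tdd | calc/__main__.py | complete_statement
-- ===== SOURCE A (Python) =====
-- def complete_statement(s):
--     s=list(s)+['end',]
--     x=0
--     while(True):
--         if (s[x]=='-'  or s[x]=='+')and s[x+1]=='(':
--             s.insert(x+1,'1')
--             x+=1
--         x+=1
--         if s[x]=='end':
--             break
--     x=0
--     while(True):
--         if s[x] in ['0','1','2','3','4','5','6','7','8','9']:
--             if s[x+1]=='(':
--                 s.insert(x+1,'*')
--                 x+=1
--         x+=1
--         if s[x]=='end':
--             del(s[x])
--             break
--     return s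
-- ===== SOURCE B (Python) =====
-- def complete_statement(s):
--     res = []
--     for c in s:
--         if c == '(':
--             last = res[-1] if res else None
--             if last == '+' or last == '-':
--                 res += ['1', '*', '(']
--             elif last in ('0', '1', '2', '3', '4', '5', '6', '7', '8', '9'):
--                 res += ['*', '(']
--             else:
--                 res.append('(')
--         else:
--             res.append(c)
--     return res
-- ===== Notes on version B (the rewrite author's own statement) =====
-- stated objective: faster
-- what changed: Replaced A's two sequential index-walking passes with quadratic list.insert calls and an 'end' sentinel by a single left-to-right pass that appends to a result list, inspecting only the last emitted token to decide the implicit '1'/'*' insertions.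
-- intended difference: On inputs containing the literal token 'end' at a position >= 1 followed somewhere later by a non-'end' token, A mistakes the input token for its own sentinel, stops processing there and returns the half-processed list with its appended sentinel leaked at the end , while B processes every token uniformly and leaves the input token 'end' in place; B's value is the intended one since 'end' is ordinary input, not a sentinel (witness: the pinned pvDiffWitness). — e.g. on complete_statement(["1", "end", "("]): A returns ["1", "(", "end"], B returns ["1", "end", "("]
import Mathlib
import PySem

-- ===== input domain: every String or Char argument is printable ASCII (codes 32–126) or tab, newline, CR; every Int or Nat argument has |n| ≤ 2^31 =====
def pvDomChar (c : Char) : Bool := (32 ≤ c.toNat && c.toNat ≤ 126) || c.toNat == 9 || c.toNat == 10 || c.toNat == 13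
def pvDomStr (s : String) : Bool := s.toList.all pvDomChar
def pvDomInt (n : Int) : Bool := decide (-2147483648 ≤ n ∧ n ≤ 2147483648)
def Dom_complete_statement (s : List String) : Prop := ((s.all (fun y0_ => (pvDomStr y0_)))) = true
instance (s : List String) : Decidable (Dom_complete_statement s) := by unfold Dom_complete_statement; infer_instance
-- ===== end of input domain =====

-- B replaces A's two index-walking insert passes by one O(n) append-only pass over the tokens.

-- ===== PORT A =====
def pvDigits : List String := ["0","1","2","3","4","5","6","7","8","9"]

-- first while loop of A: body (maybe insert '1', advance), then break test 's[x]=="end"'.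
-- Python raises IndexError where an index is out of range; the port returns the list there
-- (reachable only for s = [], which Pre_ excludes).
def pvPass1 (s : List String) (x : Nat) : List String :=
  if (s.getD x "" = "-" ∨ s.getD x "" = "+") ∧ s.getD (x+1) "" = "(" then
    let s' := s.insertIdx (x+1) "1"
    if _h : x + 2 < s'.length then
      if s'.getD (x+2) "" = "end" then s' else pvPass1 s' (x+2)
    else s'
  else
    if _h : x + 1 < s.length then
      if s.getD (x+1) "" = "end" then s else pvPass1 s (x+1)
    else s
termination_by s.length + 1 - x
decreasing_by
  · simp only [s', List.length_insertIdx] at _h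
    simp only [List.length_insertIdx]
    split at _h <;> split <;> omega
  · omega

-- second while loop of A: maybe insert '*', advance, break test with 'del s[x]'.
def pvPass2 (s : List String) (x : Nat) : List String :=
  if s.getD x "" ∈ pvDigits ∧ s.getD (x+1) "" = "(" then
    let s' := s.insertIdx (x+1) "*"
    if _h : x + 2 < s'.length then
      if s'.getD (x+2) "" = "end" then s'.eraseIdx (x+2) else pvPass2 s' (x+2)
    else s'
  else
    if _h : x + 1 < s.length then
      if s.getD (x+1) "" = "end" then s.eraseIdx (x+1) else pvPass2 s (x+1)
    else s
termination_by s.length + 1 - x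
decreasing_by
  · simp only [s', List.length_insertIdx] at _h
    simp only [List.length_insertIdx]
    split at _h <;> split <;> omega
  · omega

def complete_statement (s : List String) : List String :=
  pvPass2 (pvPass1 (s ++ ["end"]) 0) 0

-- ===== PORT B =====
def pvStep (res : List String) (c : String) : List String :=
  if c = "(" then
    match res.getLast? with
    | none => res ++ ["("]
    | some l =>
      if l = "+" ∨ l = "-" then res ++ ["1", "*", "("]
      else if l ∈ pvDigits then res ++ ["*", "("]
      else res ++ ["("]
  else res ++ [c]

def complete_statement_alt (s : List String) : List String :=
  s.foldl pvStep []

-- ===== PRECONDITION & SPEC =====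
-- A raises IndexError on the empty list (its first loop's break test reads s[1] of ['end']).
def Pre_complete_statement (s : List String) : Prop := s ≠ []
instance (s : List String) : Decidable (Pre_complete_statement s) := by unfold Pre_complete_statement; infer_instance
def pvWitness_complete_statement : List String := ["1", "+", "(", "2", ")"]

-- On inputs containing the literal token "end" at a position ≥ 1 followed later by a non-"end"
-- token, A mistakes the input token for its own sentinel, stops processing there and returns the
-- half-processed list with its sentinel leaked at the end, while B treats "end" as an ordinary
-- token; B's value is the intended one.
def D_complete_statement (s : List String) : Prop :=
  "end" ∈ s.tail ∧ ∃ x ∈ s.tail.drop (s.tail.idxOf "end" + 1), x ≠ "end"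
instance (s : List String) : Decidable (D_complete_statement s) := by unfold D_complete_statement; infer_instance

def Spec_complete_statement (s : List String) (out : List String) : Prop :=
  ¬ D_complete_statement s → out = complete_statement_alt s
instance (s : List String) (out : List String) : Decidable (Spec_complete_statement s out) := by unfold Spec_complete_statement; infer_instance

def pvDiffWitness_complete_statement : List String := ["1", "end", "("]
def pvDiffWitnessOut_complete_statement : (List String) × (List String) :=
  (["1", "(", "end"], ["1", "end", "("])

-- ===== CLAIM =====
def Claim_unchanged_complete_statement : Prop :=
  ∀ (s : List String), Dom_complete_statement s → Pre_complete_statement s →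
    Spec_complete_statement s (complete_statement s)
def Claim_changed_complete_statement : Prop :=
  Dom_complete_statement (pvDiffWitness_complete_statement) ∧
  Pre_complete_statement (pvDiffWitness_complete_statement) ∧
  D_complete_statement (pvDiffWitness_complete_statement) ∧
  complete_statement (pvDiffWitness_complete_statement) = pvDiffWitnessOut_complete_statement.1 ∧
  complete_statement_alt (pvDiffWitness_complete_statement) = pvDiffWitnessOut_complete_statement.2 ∧
  pvDiffWitnessOut_complete_statement.1 ≠ pvDiffWitnessOut_complete_statement.2
def Claim_exact_complete_statement : Prop :=
  ∀ (s : List String), Dom_complete_statement s → Pre_complete_statement s →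
    D_complete_statement s → complete_statement s ≠ complete_statement_alt s
-- ===== LEMMAS AND PROOFS =====

-- pure-function reading of A's first loop (from the break test on, position-free)
def pvP1 : List String → List String
  | [] => []
  | c :: t =>
    (if (c = "-" ∨ c = "+") ∧ t.headD "" = "(" then [c, "1"] else [c]) ++
      (if t.headD "" = "end" then t else pvP1 t)

-- pure-function reading of A's second loop
def pvP2 : List String → List String
  | [] => []
  | c :: t =>
    (if c ∈ pvDigits ∧ t.headD "" = "(" then [c, "*"] else [c]) ++
      (if t.headD "" = "end" then t.drop 1 else pvP2 t)

-- A's first pass with the sentinel machinery stripped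
def pvF1 : List String → List String
  | [] => []
  | c :: t => (if (c = "-" ∨ c = "+") ∧ t.headD "" = "(" then [c, "1"] else [c]) ++ pvF1 t

-- A's second pass with the sentinel machinery stripped
def pvF2 : List String → List String
  | [] => []
  | c :: t => (if c ∈ pvDigits ∧ t.headD "" = "(" then [c, "*"] else [c]) ++ pvF2 t

def pvIns : Option String → List String
  | none => []
  | some l => if l = "+" ∨ l = "-" then ["1", "*"] else if l ∈ pvDigits then ["*"] else []

-- pure-function reading of B's fold, threading the previous original token
def pvFB : Option String → List String → List String
  | _, [] => []
  | prev, c :: t =>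
    if c = "(" then pvIns prev ++ "(" :: pvFB (some "(") t else c :: pvFB (some c) t

lemma pv_getD_append (l r : List String) : (l ++ r).getD l.length "" = r.headD "" := by
  cases r <;> simp [List.getD_eq_getElem?_getD]


lemma pv_getD_mid (l : List String) (c : String) (r : List String) :
    (l ++ c :: r).getD l.length "" = c := by
  simpa using pv_getD_append l (c :: r)


lemma pv_getD_mid1 (l : List String) (c : String) (r : List String) :
    (l ++ c :: r).getD (l.length + 1) "" = r.headD "" := by
  simpa using pv_getD_append (l ++ [c]) r


lemma pv_insertIdx_mid : ∀ (l : List String) (c a : String) (r : List String),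
    (l ++ c :: r).insertIdx (l.length + 1) a = l ++ c :: a :: r := by
  intro l
  induction l with
  | nil => intro c a r; simp [List.insertIdx]
  | cons b l ih =>
    intro c a r
    have h : (b :: l ++ c :: r).insertIdx (l.length + 1 + 1) a
        = b :: (l ++ c :: r).insertIdx (l.length + 1) a := by
      simp [List.insertIdx_succ_cons]
    simpa [h] using congrArg (List.cons b) (ih c a r)


lemma pv_eraseIdx_mid : ∀ (l : List String) (c e : String) (r : List String),
    (l ++ c :: e :: r).eraseIdx (l.length + 1) = l ++ c :: r := by
  intro l
  induction l with
  | nil => intro c e r; simp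
  | cons b l ih => intro c e r; simp [ih c e r]


lemma pvP1_cons (c : String) (t : List String) :
    pvP1 (c :: t) = c :: ((if (c = "-" ∨ c = "+") ∧ t.headD "" = "(" then ["1"] else []) ++
      (if t.headD "" = "end" then t else pvP1 t)) := by
  simp only [pvP1]
  split <;> simp


lemma pvF1_cons (c : String) (t : List String) :
    pvF1 (c :: t) = c :: ((if (c = "-" ∨ c = "+") ∧ t.headD "" = "(" then ["1"] else []) ++ pvF1 t) := by
  simp only [pvF1]
  split <;> simp


lemma pvPass1_bridge : ∀ (rest : List String) (c : String) (done : List String),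
    pvPass1 (done ++ c :: rest) done.length = done ++ pvP1 (c :: rest) := by
  intro rest
  induction rest with
  | nil =>
    intro c done
    rw [pvPass1]
    rw [pv_getD_mid, pv_getD_mid1]
    simp [pvP1]
  | cons d t ih =>
    intro c done
    rw [pvPass1]
    rw [pv_getD_mid, pv_getD_mid1]
    by_cases hc : (c = "-" ∨ c = "+") ∧ (d :: t).headD "" = "("
    · have hd : d = "(" := by simpa using hc.2
      rw [if_pos hc]
      simp only []
      rw [pv_insertIdx_mid]
      have hE : done ++ c :: "1" :: d :: t = (done ++ [c, "1"]) ++ d :: t := by simp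
      have hL : done.length + 2 = (done ++ [c, "1"]).length := by simp
      rw [hE, hL]
      have hlt : (done ++ [c, "1"]).length < ((done ++ [c, "1"]) ++ d :: t).length := by simp
      rw [dif_pos hlt, pv_getD_mid]
      rw [if_neg (by simp [hd])]
      rw [ih d (done ++ [c, "1"])]
      simp [pvP1, hc, hd]
    · rw [if_neg hc]
      have hE : done ++ c :: d :: t = (done ++ [c]) ++ d :: t := by simp
      have hL : done.length + 1 = (done ++ [c]).length := by simp
      rw [hE, hL]
      have hlt : (done ++ [c]).length < ((done ++ [c]) ++ d :: t).length := by simp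
      rw [dif_pos hlt]
      simp only [List.headD_cons]
      have hc2 : ¬((c = "-" ∨ c = "+") ∧ d = "(") := by simpa using hc
      by_cases hd : d = "end"
      · rw [if_pos hd]
        simp [pvP1, hc2, hd]
      · rw [if_neg hd]
        rw [ih d (done ++ [c])]
        simp [pvP1, hc2, hd]


lemma pvPass2_bridge : ∀ (rest : List String) (c : String) (done : List String),
    pvPass2 (done ++ c :: rest) done.length = done ++ pvP2 (c :: rest) := by
  intro rest
  induction rest with
  | nil =>
    intro c done
    rw [pvPass2]
    rw [pv_getD_mid, pv_getD_mid1]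
    simp [pvP2]
  | cons d t ih =>
    intro c done
    rw [pvPass2]
    rw [pv_getD_mid, pv_getD_mid1]
    by_cases hc : c ∈ pvDigits ∧ (d :: t).headD "" = "("
    · have hd : d = "(" := by simpa using hc.2
      rw [if_pos hc]
      simp only []
      rw [pv_insertIdx_mid]
      have hE : done ++ c :: "*" :: d :: t = (done ++ [c, "*"]) ++ d :: t := by simp
      have hL : done.length + 2 = (done ++ [c, "*"]).length := by simp
      rw [hE, hL]
      have hlt : (done ++ [c, "*"]).length < ((done ++ [c, "*"]) ++ d :: t).length := by simp
      rw [dif_pos hlt, pv_getD_mid]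
      rw [if_neg (by simp [hd])]
      rw [ih d (done ++ [c, "*"])]
      simp [pvP2, hc, hd]
    · rw [if_neg hc]
      have hlt : done.length + 1 < (done ++ c :: d :: t).length := by simp
      rw [dif_pos hlt]
      simp only [List.headD_cons]
      have hc2 : ¬(c ∈ pvDigits ∧ d = "(") := by simpa using hc
      by_cases hd : d = "end"
      · rw [if_pos hd]
        subst hd
        rw [pv_eraseIdx_mid]
        simp [pvP2, hc2]
      · rw [if_neg hd]
        have hE : done ++ c :: d :: t = (done ++ [c]) ++ d :: t := by simp
        have hL : done.length + 1 = (done ++ [c]).length := by simp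
        rw [hE, hL]
        rw [ih d (done ++ [c])]
        simp [pvP2, hc2, hd]


lemma pvPass1_nil (c : String) (rest : List String) :
    pvPass1 (c :: rest) 0 = pvP1 (c :: rest) := by
  simpa using pvPass1_bridge rest c []

lemma pvPass2_nil (c : String) (rest : List String) :
    pvPass2 (c :: rest) 0 = pvP2 (c :: rest) := by
  simpa using pvPass2_bridge rest c []

lemma pv_complete_A (s : List String) (hs : s ≠ []) :
    complete_statement s = pvP2 (pvP1 (s ++ ["end"])) := by
  obtain ⟨c, t, rfl⟩ := List.exists_cons_of_ne_nil hs
  unfold complete_statement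
  rw [show (c :: t) ++ ["end"] = c :: (t ++ ["end"]) from rfl]
  rw [pvPass1_nil c (t ++ ["end"])]
  rw [pvP1_cons]
  rw [pvPass2_nil]

lemma pvP1_no_end : ∀ (t : List String) (c : String) (r : List String), "end" ∉ t →
    pvP1 ((c :: t) ++ "end" :: r) = pvF1 (c :: t) ++ "end" :: r := by
  intro t
  induction t with
  | nil => intro c r _; simp [pvP1, pvF1]
  | cons d t ih =>
    intro c r h
    have hd : d ≠ "end" := by simp at h; exact Ne.symm h.1
    have ht : "end" ∉ t := by simp at h; exact h.2
    simp only [List.cons_append]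
    rw [pvP1, pvF1]
    simp only [List.headD_cons, List.cons_append]
    rw [if_neg hd]
    rw [show pvP1 (d :: (t ++ "end" :: r)) = pvF1 (d :: t) ++ "end" :: r from by
      simpa using ih d r ht]
    simp


lemma pvP2_no_end : ∀ (t : List String) (c : String) (r : List String), "end" ∉ t →
    pvP2 ((c :: t) ++ "end" :: r) = pvF2 (c :: t) ++ r := by
  intro t
  induction t with
  | nil => intro c r _; simp [pvP2, pvF2]
  | cons d t ih =>
    intro c r h
    have hd : d ≠ "end" := by simp at h; exact Ne.symm h.1
    have ht : "end" ∉ t := by simp at h; exact h.2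
    simp only [List.cons_append]
    rw [pvP2, pvF2]
    simp only [List.headD_cons, List.cons_append]
    rw [if_neg hd]
    rw [show pvP2 (d :: (t ++ "end" :: r)) = pvF2 (d :: t) ++ r from by
      simpa using ih d r ht]
    simp


lemma pv_digit_not_sign (c : String) (h : c ∈ pvDigits) : ¬(c = "-" ∨ c = "+") := by
  fin_cases h <;> decide


lemma pvF1_mem : ∀ (t : List String) (x : String), x ∈ pvF1 t → x ∈ t ∨ x = "1" := by
  intro t
  induction t with
  | nil => simp [pvF1]
  | cons c t ih =>
    intro x hx
    rw [pvF1_cons] at hx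
    rcases List.mem_cons.1 hx with h | h
    · exact Or.inl (by simp [h])
    · rcases List.mem_append.1 h with h | h
      · right
        revert h; split <;> intro h <;> simp_all
      · rcases ih x h with h2 | h2
        · exact Or.inl (List.mem_cons_of_mem _ h2)
        · exact Or.inr h2


lemma pvH : ∀ (t : List String) (c : String), pvF2 (pvF1 (c :: t)) = c :: pvFB (some c) t := by
  intro t
  induction t with
  | nil => simp [pvF1, pvF2, pvFB]
  | cons d t ih =>
    intro c
    by_cases h1 : (c = "-" ∨ c = "+") ∧ d = "("
    · obtain ⟨hc, hd⟩ := h1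
      subst hd
      have e1 : pvF1 (c :: "(" :: t) = c :: "1" :: "(" :: pvF1 t := by
        rw [pvF1]; rw [if_pos (by simpa using hc)]
        rw [pvF1]; rw [if_neg (by simp)]
        simp
      rw [e1]
      have hcd : ¬(c ∈ pvDigits ∧ ("1" :: "(" :: pvF1 t).headD "" = "(") := by
        rintro ⟨hh, hq⟩; simp at hq
      rw [pvF2, if_neg hcd]
      rw [pvF2, if_pos (by simp [pvDigits])]
      have e2 : "(" :: pvF1 t = pvF1 ("(" :: t) := by
        rw [pvF1, if_neg (by simp)]; simp
      rw [e2, ih "("]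
      rw [pvFB, if_pos rfl, pvIns, if_pos (Or.symm hc)]
      simp
    · have e1 : pvF1 (c :: d :: t) = c :: pvF1 (d :: t) := by
        rw [pvF1, if_neg (by simpa using h1)]; simp
      rw [e1]
      have hd1 : (pvF1 (d :: t)).headD "" = d := by rw [pvF1_cons]; simp
      by_cases h2 : c ∈ pvDigits ∧ d = "("
      · rw [pvF2, if_pos ⟨h2.1, by rw [hd1, h2.2]⟩]
        rw [ih d]
        have hplus : ¬(c = "+" ∨ c = "-") := by
          have h3 := pv_digit_not_sign c h2.1
          rintro (h | h)
          · exact h3 (Or.inr h)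
          · exact h3 (Or.inl h)
        have hins : pvIns (some c) = ["*"] := by
          rw [pvIns, if_neg hplus, if_pos h2.1]
        simp [pvFB, h2.2, hins]
      · rw [pvF2, if_neg (by rw [hd1]; exact h2)]
        rw [ih d]
        by_cases hd : d = "("
        · have hns : ¬(c = "-" ∨ c = "+") := fun hh => h1 ⟨hh, hd⟩
          have hnd : c ∉ pvDigits := fun hh => h2 ⟨hh, hd⟩
          have hplus : ¬(c = "+" ∨ c = "-") := by
            rintro (h | h)
            · exact hns (Or.inr h)
            · exact hns (Or.inl h)
          have hins : pvIns (some c) = [] := by rw [pvIns, if_neg hplus, if_neg hnd]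
          simp [pvFB, hd, hins]
        · simp [pvFB, hd]


lemma pvH0 (p : List String) : pvF2 (pvF1 p) = pvFB none p := by
  cases p with
  | nil => simp [pvF1, pvF2, pvFB]
  | cons c t =>
    rw [pvH t c]
    by_cases hc : c = "("
    · subst hc
      rw [pvFB, if_pos rfl]
      simp [pvIns]
    · rw [pvFB, if_neg hc]


lemma pv_foldl_step : ∀ (s acc : List String), s.foldl pvStep acc = acc ++ pvFB acc.getLast? s := by
  intro s
  induction s with
  | nil => intro acc; simp [pvFB]
  | cons c t ih =>
    intro acc
    rw [List.foldl_cons, ih (pvStep acc c)]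
    by_cases hc : c = "("
    · subst hc
      cases hl : acc.getLast? with
      | none =>
        simp only [pvStep, if_pos rfl, hl]
        simp [pvFB, pvIns, List.getLast?_concat]
      | some l =>
        simp only [pvStep, hl]
        rw [pvFB, if_pos rfl, pvIns]
        by_cases hsign : l = "+" ∨ l = "-"
        · simp only [if_pos hsign]
          simp [List.getLast?_append]
        · simp only [if_neg hsign]
          by_cases hdig : l ∈ pvDigits
          · simp only [if_pos hdig]
            simp [List.getLast?_append]
          · simp only [if_neg hdig]
            simp [List.getLast?_append]
    · simp only [pvStep, if_neg hc]
      rw [pvFB, if_neg hc]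
      simp [List.getLast?_concat]


lemma pvFB_rep : ∀ (k : Nat) (prev : Option String),
    pvFB prev (List.replicate k "end") = List.replicate k "end" := by
  intro k
  induction k with
  | zero => intro prev; simp [pvFB]
  | succ n ih => intro prev; rw [List.replicate_succ, pvFB, if_neg (by decide)]; rw [ih]


lemma pvFB_append_rep : ∀ (p : List String) (prev : Option String) (k : Nat),
    pvFB prev (p ++ List.replicate k "end") = pvFB prev p ++ List.replicate k "end" := by
  intro p
  induction p with
  | nil => intro prev k; simp [pvFB, pvFB_rep]
  | cons c t ih =>
    intro prev k
    by_cases hc : c = "("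
    · subst hc
      simp only [List.cons_append]
      rw [pvFB, if_pos rfl, pvFB, if_pos rfl, ih]
      simp
    · simp only [List.cons_append]
      rw [pvFB, if_neg hc, pvFB, if_neg hc, ih]
      simp


lemma pv_not_mem_take_idxOf (a : String) : ∀ (l : List String), a ∉ l.take (l.idxOf a) := by
  intro l
  induction l with
  | nil => simp
  | cons b l ih =>
    by_cases hb : b = a
    · simp [List.idxOf_cons, hb]
    · simp [List.idxOf_cons, hb, ih, Ne.symm hb]

lemma pvFB_append_end : ∀ (xs : List String) (prev : Option String) (t : List String),
    pvFB prev (xs ++ "end" :: t) = pvFB prev xs ++ "end" :: pvFB (some "end") t := by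
  intro xs
  induction xs with
  | nil =>
    intro prev t
    rw [List.nil_append, pvFB.eq_2]
    rw [if_neg (show ¬("end" : String) = "(" by decide)]
    simp [pvFB]
  | cons c xs ih =>
    intro prev t
    by_cases hc : c = "("
    · subst hc
      simp only [List.cons_append]
      rw [pvFB, if_pos rfl, pvFB, if_pos rfl, ih]
      simp
    · simp only [List.cons_append]
      rw [pvFB, if_neg hc, pvFB, if_neg hc, ih]
      simp

lemma pv_rot_ne : ∀ (suffix : List String) (prev : Option String),
    (∃ x ∈ suffix, x ≠ "end") → suffix ++ ["end"] ≠ "end" :: pvFB prev suffix := by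
  intro suffix
  induction suffix with
  | nil => rintro prev ⟨x, hx, _⟩; simp at hx
  | cons c t ih =>
    intro prev hex heq
    by_cases hc : c = "end"
    · subst hc
      rw [pvFB, if_neg (by decide)] at heq
      simp only [List.cons_append] at heq
      injection heq with _ h2
      have hex2 : ∃ x ∈ t, x ≠ "end" := by
        obtain ⟨x, hx, hne⟩ := hex
        rcases List.mem_cons.1 hx with rfl | hx2
        · exact absurd rfl hne
        · exact ⟨x, hx2, hne⟩
      exact ih (some "end") hex2 h2
    · have h := congrArg List.head? heq
      simp at h
      exact hc h

lemma pv_decomp (s : List String) (hs : s ≠ []) (hD : ¬ D_complete_statement s) :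
    ∃ (c : String) (t : List String) (k : Nat),
      s = (c :: t) ++ List.replicate k "end" ∧ "end" ∉ t := by
  obtain ⟨c, t0, rfl⟩ := List.exists_cons_of_ne_nil hs
  by_cases he : "end" ∈ t0
  · have hall : ∀ x ∈ t0.drop (t0.idxOf "end" + 1), x = "end" := by
      unfold D_complete_statement at hD
      push_neg at hD
      simpa using hD (by simpa using he)
    have hjlt : t0.idxOf "end" < t0.length := List.idxOf_lt_length_of_mem he
    have hdrop : t0.drop (t0.idxOf "end") =
        List.replicate (t0.length - t0.idxOf "end") "end" := by
      have h1 : t0.drop (t0.idxOf "end") = t0[t0.idxOf "end"] :: t0.drop (t0.idxOf "end" + 1) :=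
        List.drop_eq_getElem_cons hjlt
      have h2 : t0[t0.idxOf "end"] = "end" := List.getElem_idxOf hjlt
      have h3 : t0.drop (t0.idxOf "end" + 1) =
          List.replicate (t0.drop (t0.idxOf "end" + 1)).length "end" :=
        List.eq_replicate_of_mem hall
      rw [h1, h2, h3, List.length_drop, ← List.replicate_succ]
      congr 1
      omega
    refine ⟨c, t0.take (t0.idxOf "end"), t0.length - t0.idxOf "end", ?_, ?_⟩
    · conv_lhs => rw [← List.take_append_drop (t0.idxOf "end") t0]
      rw [hdrop]
      simp
    · exact pv_not_mem_take_idxOf _ _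
  · exact ⟨c, t0, 0, by simp, he⟩

theorem complete_statement_tight : Claim_exact_complete_statement := by
  intro s _ hpre hD
  obtain ⟨c0, t0, rfl⟩ := List.exists_cons_of_ne_nil hpre
  unfold D_complete_statement at hD
  simp only [List.tail_cons] at hD
  obtain ⟨he, hx⟩ := hD
  have hjlt : t0.idxOf "end" < t0.length := List.idxOf_lt_length_of_mem he
  have hsplit : t0 = t0.take (t0.idxOf "end") ++ "end" :: t0.drop (t0.idxOf "end" + 1) := by
    conv_lhs => rw [← List.take_append_drop (t0.idxOf "end") t0]
    rw [List.drop_eq_getElem_cons hjlt, List.getElem_idxOf hjlt]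
  have htk : "end" ∉ t0.take (t0.idxOf "end") := pv_not_mem_take_idxOf _ _
  have hA : complete_statement (c0 :: t0)
      = pvFB none (c0 :: t0.take (t0.idxOf "end")) ++ (t0.drop (t0.idxOf "end" + 1) ++ ["end"]) := by
    rw [pv_complete_A _ (by simp)]
    have h1 : (c0 :: t0) ++ ["end"]
        = (c0 :: t0.take (t0.idxOf "end")) ++ "end" :: (t0.drop (t0.idxOf "end" + 1) ++ ["end"]) := by
      conv_lhs => rw [hsplit]
      simp
    rw [h1, pvP1_no_end _ c0 _ htk, pvF1_cons]
    have hQ : "end" ∉ ((if (c0 = "-" ∨ c0 = "+") ∧ (t0.take (t0.idxOf "end")).headD "" = "("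
        then ["1"] else []) ++ pvF1 (t0.take (t0.idxOf "end"))) := by
      intro hmem
      rcases List.mem_append.1 hmem with h | h
      · revert h; split <;> simp
      · rcases pvF1_mem _ _ h with h2 | h2
        · exact htk h2
        · exact absurd h2 (by decide)
    rw [pvP2_no_end _ c0 _ hQ, ← pvF1_cons, pvH0]
  have hB : complete_statement_alt (c0 :: t0)
      = pvFB none (c0 :: t0.take (t0.idxOf "end"))
        ++ "end" :: pvFB (some "end") (t0.drop (t0.idxOf "end" + 1)) := by
    unfold complete_statement_alt
    rw [pv_foldl_step]
    simp only [List.getLast?_nil, List.nil_append]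
    have h1 : c0 :: t0
        = (c0 :: t0.take (t0.idxOf "end")) ++ "end" :: t0.drop (t0.idxOf "end" + 1) := by
      conv_lhs => rw [hsplit]
      simp
    rw [h1, pvFB_append_end]
  intro heq
  rw [hA, hB] at heq
  exact pv_rot_ne _ (some "end") hx (List.append_cancel_left heq)

-- ===== VERDICT =====
theorem complete_statement_spec : Claim_unchanged_complete_statement := by
  intro s _ hpre hD
  obtain ⟨c, t, k, rfl, hte⟩ := pv_decomp _ hpre hD
  rw [pv_complete_A _ (by simp)]
  have hA1 : ((c :: t) ++ List.replicate k "end") ++ ["end"]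
      = (c :: t) ++ "end" :: List.replicate k "end" := by
    rw [List.append_assoc]
    congr 1
    rw [← List.replicate_succ, ← List.replicate_succ']
  rw [hA1, pvP1_no_end t c _ hte]
  rw [pvF1_cons]
  have hQ : "end" ∉ ((if (c = "-" ∨ c = "+") ∧ t.headD "" = "(" then ["1"] else []) ++ pvF1 t) := by
    intro hmem
    rcases List.mem_append.1 hmem with h | h
    · revert h; split <;> simp
    · rcases pvF1_mem t _ h with h2 | h2
      · exact hte h2
      · exact absurd h2 (by decide)
  rw [pvP2_no_end _ c _ hQ]
  rw [← pvF1_cons, pvH0]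
  unfold complete_statement_alt
  rw [pv_foldl_step]
  simp only [List.getLast?_nil, List.nil_append, ← List.cons_append, pvFB_append_rep]

set_option maxRecDepth 4000 in
theorem complete_statement_changed : Claim_changed_complete_statement := by
  unfold Claim_changed_complete_statement
  refine ⟨by decide, by decide, by decide, ?_, by decide, by decide⟩
  show complete_statement ["1", "end", "("] = ["1", "(", "end"]
  simp [complete_statement, pvPass1, pvPass2, pvDigits]
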